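-- pv_equiv track=rewrite | github.com/Oddadmix/lahgtna-chatterbox | src/chatterbox/models/tokenizers/saudiTextUtil.py | int_to_saudi_words
-- ===== SOURCE A (Python) =====
-- _AR_DIGITS = {
--     0: "صفر", 1: "واحد", 2: "اثنين", 3: "ثلاثة", 4: "أربعة", 5: "خمسة",
--     6: "ستة", 7: "سبعة", 8: "ثمانية", 9: "تسعة", 10: "عشرة",
--     11: "أحد عشر", 12: "اثنا عشر", 13: "ثلاثة عشر", 14: "أربعة عشر",
--     15: "خمسة عشر", 16: "ستة عشر", 17: "سبعة عشر", 18: "ثمانية عشر",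
--     19: "تسعة عشر"
-- }
--
-- _AR_TENS_ACC = {
--     20: "عشرين", 30: "ثلاثين", 40: "أربعين", 50: "خمسين",
--     60: "ستين", 70: "سبعين", 80: "ثمانين", 90: "تسعين"
-- }
--
-- _AR_HUNDREDS = {
--     100: "مئة", 200: "مئتان", 300: "ثلاثمئة", 400: "أربعمئة",
--     500: "خمسمئة", 600: "ستمئة", 700: "سبعمئة",
--     800: "ثمانمئة", 900: "تسعمئة"
-- }
--
-- _SCALES = [
--     (1_000_000_000, "مليار", "ملياران", "مليارات"),
--     (1_000_000,     "مليون", "مليونان", "ملايين"),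
--     (1_000,         "ألف",   "ألفان",   "آلاف"),
-- ]
--
-- def int_to_saudi_words(n: int) -> str:
--     """
--     Convert a non-negative integer to Saudi/MSA Arabic words.
--     Uses accusative case for natural TTS flow.
--     """
--     if n < 0:
--         return "سالب " + int_to_saudi_words(-n)
--     if n in _AR_DIGITS:
--         return _AR_DIGITS[n]
--     if n < 100:
--         tens = (n // 10) * 10
--         ones = n % 10
--         if ones == 0:
--             return _AR_TENS_ACC[tens]
--         # e.g. "خمسة وعشرين"
--         return f"{_AR_DIGITS[ones]} و{_AR_TENS_ACC[tens]}"
--     if n < 1000: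
--         hundreds = (n // 100) * 100
--         rest = n % 100
--         base = _AR_HUNDREDS[hundreds]
--         if rest == 0:
--             return base
--         return f"{base} و{int_to_saudi_words(rest)}"
--
--     for scale_value, scale_sg, scale_du, scale_pl in _SCALES:
--         if n >= scale_value:
--             major = n // scale_value
--             rest  = n % scale_value
--
--             if major == 1:
--                 major_words = scale_sg          # "ألف"
--             elif major == 2:
--                 major_words = scale_du          # "ألفان"
--             elif 3 <= major <= 10:
--                 major_words = f"{int_to_saudi_words(major)} {scale_pl}"   # "ثلاثة آلاف"
--             else:
--                 major_words = f"{int_to_saudi_words(major)} {scale_sg}"   # "أحد عشر ألف"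
--
--             if rest:
--                 major_words += f" و{int_to_saudi_words(rest)}"
--             return major_words
--
--     return str(n)
-- ===== SOURCE B (Python) =====
-- _AR_DIGITS = {
--     0: "صفر", 1: "واحد", 2: "اثنين", 3: "ثلاثة", 4: "أربعة", 5: "خمسة",
--     6: "ستة", 7: "سبعة", 8: "ثمانية", 9: "تسعة", 10: "عشرة",
--     11: "أحد عشر", 12: "اثنا عشر", 13: "ثلاثة عشر", 14: "أربعة عشر",
--     15: "خمسة عشر", 16: "ستة عشر", 17: "سبعة عشر", 18: "ثمانية عشر",
--     19: "تسعة عشر"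
-- }
--
-- _AR_TENS_ACC = {
--     20: "عشرين", 30: "ثلاثين", 40: "أربعين", 50: "خمسين",
--     60: "ستين", 70: "سبعين", 80: "ثمانين", 90: "تسعين"
-- }
--
-- _AR_HUNDREDS = {
--     100: "مئة", 200: "مئتان", 300: "ثلاثمئة", 400: "أربعمئة",
--     500: "خمسمئة", 600: "ستمئة", 700: "سبعمئة",
--     800: "ثمانمئة", 900: "تسعمئة"
-- }
--
-- _SCALES = [
--     (1_000_000_000, "مليار", "ملياران", "مليارات"),
--     (1_000_000,     "مليون", "مليونان", "ملايين"),
--     (1_000,         "ألف",   "ألفان",   "آلاف"),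
-- ]
--
--
-- def _three_to_words(m):
--     """Words for 1 <= m <= 999, built flatly from the three tables (no recursion)."""
--     words = []
--     h, r = divmod(m, 100)
--     if h:
--         words.append(_AR_HUNDREDS[h * 100])
--     if r:
--         if r < 20:
--             words.append(_AR_DIGITS[r])
--         else:
--             t, o = divmod(r, 10)
--             words.append(_AR_TENS_ACC[t * 10] if o == 0
--                          else f"{_AR_DIGITS[o]} و{_AR_TENS_ACC[t * 10]}")
--     return " و".join(words)
--
--
-- def int_to_saudi_words(n: int) -> str:
--     if n < 0:
--         return "سالب " + int_to_saudi_words(-n)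
--     if n < 20:
--         return _AR_DIGITS[n]
--     parts = []
--     for scale, sg, du, pl in _SCALES:
--         if n >= scale:
--             major, n = divmod(n, scale)
--             if major == 1:
--                 w = sg
--             elif major == 2:
--                 w = du
--             elif 3 <= major <= 10:
--                 w = f"{int_to_saudi_words(major)} {pl}"
--             else:
--                 w = f"{int_to_saudi_words(major)} {sg}"
--             parts.append(w)
--     if n:
--         parts.append(_three_to_words(n))
--     return " و".join(parts)
-- ===== Notes on version B (the rewrite author's own statement) =====
-- stated objective: alternative
-- what changed: B replaces A's per-branch recursion (recursing on the remainder after each scale group and inside the sub-thousand cases) with a flat non-recursive table helper for the sub-thousand group plus a single accumulate-and-join pass over the scale groups.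
import Mathlib
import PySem

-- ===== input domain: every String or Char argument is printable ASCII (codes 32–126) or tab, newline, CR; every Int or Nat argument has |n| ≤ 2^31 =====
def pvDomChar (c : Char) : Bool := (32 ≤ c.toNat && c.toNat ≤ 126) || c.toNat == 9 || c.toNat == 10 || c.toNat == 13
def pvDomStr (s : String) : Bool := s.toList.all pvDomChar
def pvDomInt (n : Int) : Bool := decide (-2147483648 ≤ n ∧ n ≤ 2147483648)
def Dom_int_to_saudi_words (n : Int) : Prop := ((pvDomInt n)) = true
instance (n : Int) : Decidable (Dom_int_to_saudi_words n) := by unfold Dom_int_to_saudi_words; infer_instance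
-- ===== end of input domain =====

-- B converts the sub-1000 group with a flat non-recursive table helper and runs ONE pass over
-- the scale groups accumulating parts joined once at the end, instead of A's per-scale early
-- return with recursion on the remainder; same return value (alternative decomposition).

-- shared module-level tables (same constants in Source A and Source B)
def arDigits : PySem.Dict Int String := PySem.Dict.ofList [
  (0, "صفر"), (1, "واحد"), (2, "اثنين"), (3, "ثلاثة"), (4, "أربعة"), (5, "خمسة"),
  (6, "ستة"), (7, "سبعة"), (8, "ثمانية"), (9, "تسعة"), (10, "عشرة"),
  (11, "أحد عشر"), (12, "اثنا عشر"), (13, "ثلاثة عشر"), (14, "أربعة عشر"),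
  (15, "خمسة عشر"), (16, "ستة عشر"), (17, "سبعة عشر"), (18, "ثمانية عشر"),
  (19, "تسعة عشر")]

def arTens : PySem.Dict Int String := PySem.Dict.ofList [
  (20, "عشرين"), (30, "ثلاثين"), (40, "أربعين"), (50, "خمسين"),
  (60, "ستين"), (70, "سبعين"), (80, "ثمانين"), (90, "تسعين")]

def arHundreds : PySem.Dict Int String := PySem.Dict.ofList [
  (100, "مئة"), (200, "مئتان"), (300, "ثلاثمئة"), (400, "أربعمئة"),
  (500, "خمسمئة"), (600, "ستمئة"), (700, "سبعمئة"),
  (800, "ثمانمئة"), (900, "تسعمئة")]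

def arScales : List (Int × String × String × String) := [
  (1000000000, "مليار", "ملياران", "مليارات"),
  (1000000,    "مليون", "مليونان", "ملايين"),
  (1000,       "ألف",   "ألفان",   "آلاف")]

-- ===== PORT A =====
-- A's for-loop over _SCALES with early return ('rec' is the recursive call, one unit of fuel spent;
-- dict lookups are getD _ "": the looked-up key is always present on the branch that reaches it)
def loopA (rec : Int → String) : List (Int × String × String × String) → Int → String
  | [], n => PySem.Int.toStr n          -- A's final 'return str(n)' (unreachable for n ≥ 1000)
  | (scaleValue, scaleSg, scaleDu, scalePl) :: restScales, n =>
    if n ≥ scaleValue then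
      let major := PySem.Int.floordiv n scaleValue
      let rest := PySem.Int.mod n scaleValue
      let majorWords :=
        if major = 1 then scaleSg
        else if major = 2 then scaleDu
        else if 3 ≤ major ∧ major ≤ 10 then rec major ++ " " ++ scalePl
        else rec major ++ " " ++ scaleSg
      if rest ≠ 0 then majorWords ++ " و" ++ rec rest else majorWords
    else loopA rec restScales n

-- fuel-indexed transliteration of A; the fuel only makes the recursion structural and is
-- never exhausted at the top-level call (each recursive call strictly shrinks |n|)
def goA : Nat → Int → String
  | 0, _ => ""                          -- unreachable with the fuel given below
  | f + 1, n =>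
    if n < 0 then "سالب " ++ goA f (-n)
    else if arDigits.contains n then arDigits.getD n ""
    else if n < 100 then
      let tens := (PySem.Int.floordiv n 10) * 10
      let ones := PySem.Int.mod n 10
      if ones = 0 then arTens.getD tens ""
      else arDigits.getD ones "" ++ " و" ++ arTens.getD tens ""
    else if n < 1000 then
      let hundreds := (PySem.Int.floordiv n 100) * 100
      let rest := PySem.Int.mod n 100
      let base := arHundreds.getD hundreds ""
      if rest = 0 then base else base ++ " و" ++ goA f rest
    else loopA (goA f) arScales n

def int_to_saudi_words (n : Int) : String := goA (n.natAbs + 7) n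

-- ===== PORT B =====
-- Source B's _three_to_words: flat, non-recursive words for 1..999
def threeToWords (m : Int) : String :=
  let words : List String := []
  let h := PySem.Int.floordiv m 100
  let r := PySem.Int.mod m 100
  let words := if h ≠ 0 then words ++ [arHundreds.getD (h * 100) ""] else words
  let words :=
    if r ≠ 0 then
      if r < 20 then words ++ [arDigits.getD r ""]
      else
        let t := PySem.Int.floordiv r 10
        let o := PySem.Int.mod r 10
        words ++ [if o = 0 then arTens.getD (t * 10) ""
                  else arDigits.getD o "" ++ " و" ++ arTens.getD (t * 10) ""]
    else words
  PySem.Str.join " و" words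

-- Source B's for-loop over _SCALES: accumulates the scale-group words and the shrinking remainder
def loopB (rec : Int → String) : List (Int × String × String × String) → Int → List String → List String × Int
  | [], n, parts => (parts, n)
  | (scale, sg, du, pl) :: restScales, n, parts =>
    if n ≥ scale then
      let major := PySem.Int.floordiv n scale
      let n' := PySem.Int.mod n scale
      let w :=
        if major = 1 then sg
        else if major = 2 then du
        else if 3 ≤ major ∧ major ≤ 10 then rec major ++ " " ++ pl
        else rec major ++ " " ++ sg
      loopB rec restScales n' (parts ++ [w])
    else loopB rec restScales n parts

-- fuel-indexed transliteration of B (same fuel device as for A)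
def goB : Nat → Int → String
  | 0, _ => ""                          -- unreachable with the fuel given below
  | f + 1, n =>
    if n < 0 then "سالب " ++ goB f (-n)
    else if n < 20 then arDigits.getD n ""
    else
      let res := loopB (goB f) arScales n []
      let parts := if res.2 ≠ 0 then res.1 ++ [threeToWords res.2] else res.1
      PySem.Str.join " و" parts

def int_to_saudi_words_alt (n : Int) : String := goB (n.natAbs + 7) n

-- ===== PRECONDITION & SPEC =====
def Spec_int_to_saudi_words (n : Int) (out : String) : Prop := out = int_to_saudi_words_alt n
instance (n : Int) (out : String) : Decidable (Spec_int_to_saudi_words n out) := by unfold Spec_int_to_saudi_words; infer_instance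

-- ===== CLAIM (what is proved, stated in full; the proofs are below) =====
def Claim_equal_int_to_saudi_words : Prop := ∀ (n : Int), Dom_int_to_saudi_words n → Spec_int_to_saudi_words n (int_to_saudi_words n)

-- ===== LEMMAS AND PROOFS =====

-- goB's post-loop step, named for the proofs (definitionally what goB does)
def finishB (p : List String × Int) : List String :=
  if p.2 ≠ 0 then p.1 ++ [threeToWords p.2] else p.1

theorem join_one (sep a : String) : PySem.Str.join sep [a] = a := by
  simp [PySem.Str.join]

theorem join_cons (sep a : String) (r : List String) (hr : r ≠ []) :
    PySem.Str.join sep (a :: r) = a ++ sep ++ PySem.Str.join sep r := by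
  rcases r with _ | ⟨b, r⟩
  · exact absurd rfl hr
  · simp [PySem.Str.join, PySem.Chars.join_cons_cons, String.ofList_append, String.append_assoc]

theorem contains_digits_true (n : Int) (h0 : 0 ≤ n) (h1 : n < 20) : arDigits.contains n = true := by
  interval_cases n <;> decide

theorem contains_digits_false (n : Int) (h : 20 ≤ n) : arDigits.contains n = false := by
  rw [Bool.eq_false_iff]
  intro hc
  rw [PySem.Dict.contains_iff_mem_keys] at hc
  rw [(by decide : arDigits.keys = [0, 1, 2, 3, 4, 5, 6, 7, 8, 9, 10, 11, 12, 13, 14, 15, 16, 17, 18, 19])] at hc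
  simp at hc
  omega

-- A on 0 ≤ r < 100 never recurses: its value is fuel-independent; sub100 names it
def sub100 (r : Int) : String :=
  if r < 20 then arDigits.getD r ""
  else if PySem.Int.mod r 10 = 0 then arTens.getD ((PySem.Int.floordiv r 10) * 10) ""
  else arDigits.getD (PySem.Int.mod r 10) "" ++ " و" ++ arTens.getD ((PySem.Int.floordiv r 10) * 10) ""

theorem goA_lt100 (f : Nat) (r : Int) (h0 : 0 ≤ r) (h1 : r < 100) :
    goA (f + 1) r = sub100 r := by
  simp only [goA, sub100]
  rw [if_neg (by omega)]
  by_cases h : r < 20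
  · rw [if_pos (contains_digits_true r h0 h), if_pos h]
  · rw [if_neg (by simp [contains_digits_false r (by omega)]), if_pos h1, if_neg h]

theorem three_lt100 (m : Int) (h0 : 0 < m) (h1 : m < 100) : threeToWords m = sub100 m := by
  have hh : PySem.Int.floordiv m 100 = 0 := by
    rw [PySem.Int.floordiv_eq_ediv_of_pos (by omega)]; omega
  have hr : PySem.Int.mod m 100 = m := by
    rw [PySem.Int.mod_eq_emod_of_pos (by omega)]; omega
  simp only [threeToWords, hh, hr, sub100]
  rw [if_neg (by omega : ¬ (0:Int) ≠ 0), if_pos (by omega : m ≠ 0)]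
  by_cases h : m < 20
  · rw [if_pos h, if_pos h, List.nil_append, join_one]
  · rw [if_neg h, if_neg h, List.nil_append, join_one]

theorem three_ge100 (m : Int) (h0 : 100 ≤ m) (h1 : m < 1000) :
    threeToWords m =
      (if PySem.Int.mod m 100 = 0 then arHundreds.getD ((PySem.Int.floordiv m 100) * 100) ""
       else arHundreds.getD ((PySem.Int.floordiv m 100) * 100) "" ++ " و" ++ sub100 (PySem.Int.mod m 100)) := by
  have hh : PySem.Int.floordiv m 100 ≠ 0 := by
    rw [PySem.Int.floordiv_eq_ediv_of_pos (by omega)]; omega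
  simp only [threeToWords, sub100]
  rw [if_pos hh]
  by_cases h : PySem.Int.mod m 100 = 0
  · rw [if_neg (by omega : ¬ PySem.Int.mod m 100 ≠ 0), if_pos h, List.nil_append, join_one]
  · rw [if_pos (by omega : PySem.Int.mod m 100 ≠ 0), if_neg h]
    by_cases h20 : PySem.Int.mod m 100 < 20
    · rw [if_pos h20, if_pos h20, List.nil_append, List.singleton_append,
          join_cons _ _ _ (by simp), join_one]
    · rw [if_neg h20, if_neg h20, List.nil_append, List.singleton_append,
          join_cons _ _ _ (by simp), join_one]

-- A agrees with Source B's flat helper on the whole 1..999 group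
theorem goA_three_aux (f : Nat) (m : Int) (h0 : 0 < m) (h1 : m < 1000) :
    goA (f + 2) m = threeToWords m := by
  by_cases h : m < 100
  · rw [goA_lt100 (f + 1) m (by omega) h, three_lt100 m h0 h]
  · have hr : 0 ≤ PySem.Int.mod m 100 ∧ PySem.Int.mod m 100 < 100 := by
      rw [PySem.Int.mod_eq_emod_of_pos (by omega)]; omega
    rw [goA]
    rw [if_neg (by omega), if_neg (by simp [contains_digits_false m (by omega)]),
        if_neg (by omega), if_pos h1, three_ge100 m (by omega) h1]
    by_cases hz : PySem.Int.mod m 100 = 0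
    · rw [if_pos hz, if_pos hz]
    · rw [if_neg hz, if_neg hz, goA_lt100 f _ hr.1 hr.2]

theorem goA_three (f : Nat) (m : Int) (hf : 2 ≤ f) (h0 : 0 < m) (h1 : m < 1000) :
    goA f m = threeToWords m := by
  obtain ⟨f', rfl⟩ : ∃ f', f = f' + 2 := ⟨f - 2, by omega⟩
  exact goA_three_aux f' m h0 h1

-- B agrees with the flat helper on 1..999 (the loop fires no scale there)
theorem goB_three (g : Nat) (m : Int) (hg : 1 ≤ g) (h0 : 0 < m) (h1 : m < 1000) :
    goB g m = threeToWords m := by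
  obtain ⟨g', rfl⟩ : ∃ g', g = g' + 1 := ⟨g - 1, by omega⟩
  simp only [goB, arScales, loopB]
  rw [if_neg (by omega)]
  by_cases h : m < 20
  · rw [if_pos h, three_lt100 m h0 (by omega)]
    simp [sub100, h]
  · rw [if_neg h, if_neg (by omega : ¬ m ≥ 1000000000), if_neg (by omega : ¬ m ≥ 1000000),
        if_neg (by omega : ¬ m ≥ 1000)]
    simp only []
    rw [if_pos (by omega : m ≠ 0), List.nil_append, join_one]

-- A and B on 0..999 (used for every 'major' and every sub-1000 remainder)
theorem AB_small (f g : Nat) (m : Int) (hf : 2 ≤ f) (hg : 1 ≤ g) (h0 : 0 ≤ m) (h1 : m < 1000) :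
    goA f m = goB g m := by
  obtain ⟨f', rfl⟩ : ∃ f', f = f' + 2 := ⟨f - 2, by omega⟩
  obtain ⟨g', rfl⟩ : ∃ g', g = g' + 1 := ⟨g - 1, by omega⟩
  by_cases hz : m = 0
  · subst hz
    rw [goA, goB,
        if_neg (show ¬ (0:Int) < 0 by omega), if_neg (show ¬ (0:Int) < 0 by omega),
        if_pos (contains_digits_true 0 (by omega) (by omega)), if_pos (show (0:Int) < 20 by omega)]
  · rw [goA_three (f' + 2) m (by omega) (by omega) h1, goB_three (g' + 1) m (by omega) (by omega) h1]

-- accumulated parts only prefix the loop's own output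
theorem loopB_acc (rec : Int → String) (L : List (Int × String × String × String))
    (n : Int) (parts : List String) :
    loopB rec L n parts = (parts ++ (loopB rec L n []).1, (loopB rec L n []).2) := by
  induction L generalizing n parts with
  | nil => simp [loopB]
  | cons s rest ih =>
    obtain ⟨sc, sg, du, pl⟩ := s
    simp only [loopB]
    by_cases h : n ≥ sc
    · rw [if_pos h, if_pos h]
      rw [ih]
      conv_rhs => rw [ih]
      simp
    · rw [if_neg h, if_neg h, ih]

theorem finishB_cons (w : List String) (p : List String × Int) :
    finishB (w ++ p.1, p.2) = w ++ finishB p := by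
  by_cases h : p.2 ≠ 0 <;> simp [finishB, h]

-- the scale-group word A and B compute for one scale agree (both recurse on 'major')
theorem major_eq (f g : Nat) (major : Int) (sg du pl : String) (hf : 2 ≤ f) (hg : 1 ≤ g)
    (h0 : 0 < major) (h1 : major < 1000) :
    (if major = 1 then sg else if major = 2 then du
     else if 3 ≤ major ∧ major ≤ 10 then goA f major ++ " " ++ pl
     else goA f major ++ " " ++ sg)
    = (if major = 1 then sg else if major = 2 then du
       else if 3 ≤ major ∧ major ≤ 10 then goB g major ++ " " ++ pl
       else goB g major ++ " " ++ sg) := by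
  rw [AB_small f g major hf hg (by omega) h1]

-- the finished tail is never empty for a positive remainder
theorem finish3_ne (rec : Int → String) (r : Int) (h0 : 0 < r) :
    finishB (loopB rec [(1000, "ألف", "ألفان", "آلاف")] r []) ≠ [] := by
  by_cases h : r ≥ 1000
  · simp only [loopB, if_pos h, finishB]
    split <;> simp
  · simp only [loopB, if_neg h, finishB]
    simp [show r ≠ 0 by omega]

-- joining B's finished tail for the [ألف] suffix equals A on the remainder (0 < r < 10^6)
theorem tail3 (f g : Nat) (r : Int) (hf : 3 ≤ f) (hg : 1 ≤ g) (h0 : 0 < r) (h1 : r < 1000000) :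
    PySem.Str.join " و" (finishB (loopB (goB g) [(1000, "ألف", "ألفان", "آلاف")] r []))
      = goA f r := by
  obtain ⟨f, rfl⟩ : ∃ f', f = f' + 3 := ⟨f - 3, by omega⟩
  by_cases h : r ≥ 1000
  · have hmaj : 0 < PySem.Int.floordiv r 1000 ∧ PySem.Int.floordiv r 1000 < 1000 := by
      rw [PySem.Int.floordiv_eq_ediv_of_pos (by omega)]; omega
    have hrest : 0 ≤ PySem.Int.mod r 1000 ∧ PySem.Int.mod r 1000 < 1000 := by
      rw [PySem.Int.mod_eq_emod_of_pos (by omega)]; omega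
    rw [goA, if_neg (by omega), if_neg (by simp [contains_digits_false r (by omega)]),
        if_neg (by omega), if_neg (by omega)]
    simp only [arScales, loopA]
    rw [if_neg (by omega : ¬ r ≥ 1000000000), if_neg (by omega : ¬ r ≥ 1000000), if_pos h]
    simp only [loopB, if_pos h, List.nil_append, finishB]
    rw [← major_eq (f + 2) g _ _ _ _ (by omega) hg hmaj.1 hmaj.2]
    by_cases hz : PySem.Int.mod r 1000 = 0
    · rw [if_neg (by omega : ¬ PySem.Int.mod r 1000 ≠ 0),
          if_neg (by omega : ¬ PySem.Int.mod r 1000 ≠ 0), join_one]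
    · rw [if_pos (by omega : PySem.Int.mod r 1000 ≠ 0),
          if_pos (by omega : PySem.Int.mod r 1000 ≠ 0), List.singleton_append,
          join_cons _ _ _ (by simp), join_one, goA_three (f + 2) _ (by omega) (by omega) hrest.2]
  · simp only [loopB, if_neg h, finishB]
    rw [if_pos (by omega : r ≠ 0), List.nil_append, join_one, goA_three (f + 3) r (by omega) h0 (by omega)]

theorem finish6_ne (rec : Int → String) (r : Int) (h0 : 0 < r) :
    finishB (loopB rec
      [(1000000, "مليون", "مليونان", "ملايين"), (1000, "ألف", "ألفان", "آلاف")] r []) ≠ [] := by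
  by_cases h : r ≥ 1000000
  · rw [loopB, if_pos h, loopB_acc, List.nil_append, finishB_cons]
    simp
  · rw [loopB, if_neg h]
    exact finish3_ne rec r h0

-- the [مليون, ألف] suffix (0 < r < 10^9)
theorem tail6 (f g : Nat) (r : Int) (hf : 4 ≤ f) (hg : 1 ≤ g) (h0 : 0 < r) (h1 : r < 1000000000) :
    PySem.Str.join " و" (finishB (loopB (goB g)
      [(1000000, "مليون", "مليونان", "ملايين"), (1000, "ألف", "ألفان", "آلاف")] r []))
      = goA f r := by
  obtain ⟨f, rfl⟩ : ∃ f', f = f' + 4 := ⟨f - 4, by omega⟩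
  by_cases h : r ≥ 1000000
  · have hmaj : 0 < PySem.Int.floordiv r 1000000 ∧ PySem.Int.floordiv r 1000000 < 1000 := by
      rw [PySem.Int.floordiv_eq_ediv_of_pos (by omega)]; omega
    have hrest : 0 ≤ PySem.Int.mod r 1000000 ∧ PySem.Int.mod r 1000000 < 1000000 := by
      rw [PySem.Int.mod_eq_emod_of_pos (by omega)]; omega
    rw [goA, if_neg (by omega), if_neg (by simp [contains_digits_false r (by omega)]),
        if_neg (by omega), if_neg (by omega)]
    simp only [arScales, loopA]
    rw [if_neg (by omega : ¬ r ≥ 1000000000), if_pos h]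
    conv_lhs => rw [loopB, if_pos h, loopB_acc]
    rw [List.nil_append, finishB_cons]
    rw [← major_eq (f + 3) g _ _ _ _ (by omega) hg hmaj.1 hmaj.2]
    by_cases hz : PySem.Int.mod r 1000000 = 0
    · rw [if_neg (by omega : ¬ PySem.Int.mod r 1000000 ≠ 0), hz]
      simp only [loopB, if_neg (show ¬ (0:Int) ≥ 1000 by omega), finishB]
      rw [if_neg (by omega : ¬ (0:Int) ≠ 0), List.append_nil, join_one]
    · rw [if_pos (by omega : PySem.Int.mod r 1000000 ≠ 0), List.singleton_append,
          join_cons _ _ _ (finish3_ne _ _ (by omega)),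
          tail3 (f + 3) g _ (by omega) hg (by omega) hrest.2]
  · conv_lhs => rw [loopB, if_neg h]
    exact tail3 (f + 4) g r (by omega) hg h0 (by omega)

-- A = B on all non-negative n of the domain
theorem AB_main (f g : Nat) (n : Int) (hf : 5 ≤ f) (hg : 2 ≤ g) (h0 : 0 ≤ n) (h1 : n ≤ 2147483648) :
    goA f n = goB g n := by
  obtain ⟨f, rfl⟩ : ∃ f', f = f' + 5 := ⟨f - 5, by omega⟩
  obtain ⟨g, rfl⟩ : ∃ g', g = g' + 2 := ⟨g - 2, by omega⟩
  rw [goB, if_neg (by omega : ¬ n < 0)]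
  by_cases h20 : n < 20
  · rw [if_pos h20, goA, if_neg (by omega), if_pos (contains_digits_true n h0 h20)]
  · rw [if_neg h20]
    show goA (f + 5) n = PySem.Str.join " و" (finishB (loopB (goB (g + 1)) arScales n []))
    by_cases h9 : n ≥ 1000000000
    · have hmaj : 0 < PySem.Int.floordiv n 1000000000 ∧ PySem.Int.floordiv n 1000000000 < 1000 := by
        rw [PySem.Int.floordiv_eq_ediv_of_pos (by omega)]; omega
      have hrest : 0 ≤ PySem.Int.mod n 1000000000 ∧ PySem.Int.mod n 1000000000 < 1000000000 := by
        rw [PySem.Int.mod_eq_emod_of_pos (by omega)]; omega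
      rw [goA, if_neg (by omega), if_neg (by simp [contains_digits_false n (by omega)]),
          if_neg (by omega), if_neg (by omega)]
      simp only [arScales, loopA]
      rw [if_pos h9]
      conv_rhs => rw [loopB, if_pos h9, loopB_acc]
      rw [List.nil_append, finishB_cons]
      rw [← major_eq (f + 4) (g + 1) _ _ _ _ (by omega) (by omega) hmaj.1 hmaj.2]
      by_cases hz : PySem.Int.mod n 1000000000 = 0
      · rw [if_neg (by omega : ¬ PySem.Int.mod n 1000000000 ≠ 0), hz]
        simp only [loopB, if_neg (show ¬ (0:Int) ≥ 1000000 by omega),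
          if_neg (show ¬ (0:Int) ≥ 1000 by omega), finishB]
        rw [if_neg (by omega : ¬ (0:Int) ≠ 0), List.append_nil, join_one]
      · rw [if_pos (by omega : PySem.Int.mod n 1000000000 ≠ 0), List.singleton_append,
            join_cons _ _ _ (finish6_ne _ _ (by omega)),
            tail6 (f + 4) (g + 1) _ (by omega) (by omega) (by omega) hrest.2]
    · conv_rhs => rw [arScales, loopB, if_neg h9]
      exact (tail6 (f + 5) (g + 1) n (by omega) (by omega) (by omega) (by omega)).symm



-- ===== VERDICT (by name: the statement is the Claim_ definition above) =====
theorem int_to_saudi_words_spec : Claim_equal_int_to_saudi_words := by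
  intro n hdom
  have hd : -2147483648 ≤ n ∧ n ≤ 2147483648 := by
    simpa [Dom_int_to_saudi_words, pvDomInt] using hdom
  unfold Spec_int_to_saudi_words int_to_saudi_words int_to_saudi_words_alt
  by_cases hn : n < 0
  · have e : n.natAbs + 7 = (n.natAbs + 6) + 1 := by omega
    rw [e, goA, goB, if_pos hn, if_pos hn,
        AB_main (n.natAbs + 6) (n.natAbs + 6) (-n) (by omega) (by omega) (by omega) (by omega)]
  · exact AB_main (n.natAbs + 7) (n.natAbs + 7) n (by omega) (by omega) (by omega) hd.2
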